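-- pv_equiv track=rewrite | github.com/Ryougi-Shikii/LeetCode | ContestQuestions/WeeklyContest/499/3912. Valid Elements in an Array.py | findValidElements
-- ===== SOURCE A (Python) =====
-- def findValidElements(nums: list[int]) -> list[int]:
--     n = len(nums)
--     if n <= 2:
--         return nums
--
--     valid_indices = {0, n - 1}
--
--     current_max = nums[0]
--     for i in range(1, n - 1):
--         if nums[i] > current_max:
--             valid_indices.add(i)
--             current_max = nums[i]
--
--     current_max = nums[n - 1]
--     for i in range(n - 2, 0, -1):
--         if nums[i] > current_max:
--             valid_indices.add(i)
--             current_max = nums[i]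
--
--     return [nums[i] for i in range(n) if i in valid_indices]
-- ===== SOURCE B (Python) =====
-- def findValidElements(nums: list[int]) -> list[int]:
--     # Divide and conquer: records of a segment are the records of one half plus
--     # the other half's records that beat that half's maximum; the prefix-record
--     # and suffix-record index lists share at most the global argmax index.
--     n = len(nums)
--     if n == 0:
--         return nums
--
--     def prefix_records(lo, hi):
--         # indices k in [lo, hi) with nums[k] > all of nums[lo:k], and max(nums[lo:hi])
--         if hi - lo == 1:
--             return [lo], nums[lo]
--         mid = (lo + hi) // 2
--         lrec, lmax = prefix_records(lo, mid)
--         rrec, rmax = prefix_records(mid, hi)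
--         return lrec + [k for k in rrec if nums[k] > lmax], max(lmax, rmax)
--
--     def suffix_records(lo, hi):
--         # indices k in [lo, hi) with nums[k] > all of nums[k+1:hi], and max(nums[lo:hi])
--         if hi - lo == 1:
--             return [lo], nums[lo]
--         mid = (lo + hi) // 2
--         lrec, lmax = suffix_records(lo, mid)
--         rrec, rmax = suffix_records(mid, hi)
--         return [k for k in lrec if nums[k] > rmax] + rrec, max(lmax, rmax)
--
--     pidx, _ = prefix_records(0, n)
--     sidx, _ = suffix_records(0, n)
--     if pidx[-1] == sidx[0]:
--         sidx = sidx[1:]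
--     return [nums[k] for k in pidx + sidx]
-- ===== Notes on version B (the rewrite author's own statement) =====
-- stated objective: alternative
-- what changed: A makes a forward and a backward running-max scan collecting qualifying indices in a shared set and filters range(n) by membership; B computes the prefix-record and suffix-record index lists by divide and conquer (records of a segment = records of one half plus the other half's records beating that half's maximum) and concatenates the two lists, dropping the shared global-argmax index once.
import Mathlib
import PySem

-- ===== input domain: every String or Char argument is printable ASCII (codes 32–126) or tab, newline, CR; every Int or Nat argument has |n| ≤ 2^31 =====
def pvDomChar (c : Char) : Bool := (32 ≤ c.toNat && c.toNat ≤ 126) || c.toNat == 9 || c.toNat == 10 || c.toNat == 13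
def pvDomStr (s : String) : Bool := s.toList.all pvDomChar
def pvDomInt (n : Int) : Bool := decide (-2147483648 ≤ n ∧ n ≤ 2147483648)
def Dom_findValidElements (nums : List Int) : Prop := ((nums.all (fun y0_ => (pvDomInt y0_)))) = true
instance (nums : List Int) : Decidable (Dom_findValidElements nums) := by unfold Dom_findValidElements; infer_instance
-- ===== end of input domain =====

-- B replaces A's running-max scans + index set with divide-and-conquer record finding
-- (records of a segment = records of one half plus the other half's records beating that
-- half's maximum), concatenating the two index lists (objective: alternative).


-- ===== PORT A =====
def findValidElements (nums : List Int) : List Int :=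
  let n := nums.length
  if n ≤ 2 then nums
  else
    let valid0 : PySem.Set Int := PySem.Set.ofList [0, (n : Int) - 1]
    let st1 := (PySem.List.pyRange 1 ((n : Int) - 1) 1).foldl
      (fun (st : PySem.Set Int × Int) i =>
        if PySem.List.pyGetD nums i 0 > st.2 then
          (PySem.Set.add st.1 i, PySem.List.pyGetD nums i 0)
        else st)
      (valid0, PySem.List.pyGetD nums 0 0)
    let st2 := (PySem.List.pyRange ((n : Int) - 2) 0 (-1)).foldl
      (fun (st : PySem.Set Int × Int) i =>
        if PySem.List.pyGetD nums i 0 > st.2 then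
          (PySem.Set.add st.1 i, PySem.List.pyGetD nums i 0)
        else st)
      (st1.1, PySem.List.pyGetD nums ((n : Int) - 1) 0)
    ((PySem.List.pyRange 0 (n : Int) 1).filter (fun i => PySem.Set.contains st2.1 i)).map
      (fun i => PySem.List.pyGetD nums i 0)

-- ===== PORT B =====
-- prefix_records(lo, hi): D&C, returns (record index list, max of nums[lo:hi]);
-- fuel only makes the recursion structurally terminating
def prefRecs (nums : List Int) : Nat → Nat → Nat → List Nat × Int
  | 0, _, _ => ([], 0)
  | fuel + 1, lo, hi =>
    if hi - lo = 1 then ([lo], nums.getD lo 0)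
    else
      let mid := (lo + hi) / 2
      let l := prefRecs nums fuel lo mid
      let r := prefRecs nums fuel mid hi
      (l.1 ++ r.1.filter (fun k => nums.getD k 0 > l.2), max l.2 r.2)

-- suffix_records(lo, hi)
def sufRecs (nums : List Int) : Nat → Nat → Nat → List Nat × Int
  | 0, _, _ => ([], 0)
  | fuel + 1, lo, hi =>
    if hi - lo = 1 then ([lo], nums.getD lo 0)
    else
      let mid := (lo + hi) / 2
      let l := sufRecs nums fuel lo mid
      let r := sufRecs nums fuel mid hi
      (l.1.filter (fun k => nums.getD k 0 > r.2) ++ r.1, max l.2 r.2)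

def findValidElements_alt (nums : List Int) : List Int :=
  let n := nums.length
  if n = 0 then nums
  else
    let pidx := (prefRecs nums n 0 n).1
    let sidx := (sufRecs nums n 0 n).1
    let sidx' := if pidx.getLastD 0 = sidx.headD 0 then sidx.tail else sidx
    (pidx ++ sidx').map (fun k => nums.getD k 0)

-- ===== PRECONDITION & SPEC =====
def Spec_findValidElements (nums : List Int) (out : List Int) : Prop := out = findValidElements_alt nums
instance (nums : List Int) (out : List Int) : Decidable (Spec_findValidElements nums out) := by unfold Spec_findValidElements; infer_instance

-- ===== CLAIM (what is proved, stated in full; the proofs are below) =====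
def Claim_equal_findValidElements : Prop := ∀ (nums : List Int), Dom_findValidElements nums → Spec_findValidElements nums (findValidElements nums)

-- ===== LEMMAS AND PROOFS =====

-- running max as an Option (none for []), used to CHARACTERISE both programs
def stepMax (o : Option Int) (x : Int) : Option Int :=
  match o with
  | none => some x
  | some m => if x > m then some x else some m

def gtOpt (x : Int) (o : Option Int) : Bool :=
  match o with
  | none => true
  | some m => decide (x > m)

def maxL (l : List Int) : Option Int := l.foldl stepMax none

-- k is a prefix record / suffix record of nums
def pRec (nums : List Int) (k : Nat) : Bool := gtOpt (nums.getD k 0) (maxL (nums.take k))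
def sRec (nums : List Int) (k : Nat) : Bool := gtOpt (nums.getD k 0) (maxL (nums.drop (k + 1)))

-- the loop body shared by A's two scans
def loopF (nums : List Int) (st : PySem.Set Int × Int) (i : Int) : PySem.Set Int × Int :=
  if PySem.List.pyGetD nums i 0 > st.2 then (PySem.Set.add st.1 i, PySem.List.pyGetD nums i 0) else st

theorem stepMax_some (m x : Int) : stepMax (some m) x = some (max m x) := by
  simp only [stepMax, max_def]
  split_ifs <;> simp <;> omega

theorem foldl_stepMax_some (t : List Int) : ∀ c : Int, t.foldl stepMax (some c) = some (t.foldl max c) := by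
  induction t with
  | nil => intro c; rfl
  | cons x u ih => intro c; simp [List.foldl_cons, stepMax_some, ih]

theorem maxL_append_singleton (l : List Int) (x : Int) : maxL (l ++ [x]) = stepMax (maxL l) x := by
  simp [maxL, List.foldl_append]

theorem maxL_cons (x : Int) (t : List Int) : maxL (x :: t) = stepMax (maxL t) x := by
  cases t with
  | nil => rfl
  | cons y u =>
    simp only [maxL, List.foldl_cons]
    rw [show stepMax none x = some x from rfl, show stepMax none y = some y from rfl,
      stepMax_some, foldl_stepMax_some, foldl_stepMax_some, stepMax_some]
    rw [List.foldl_assoc, max_comm]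

theorem maxL_eq_max? (l : List Int) : maxL l = PySem.List.max? l (fun x => x) := by
  cases l with
  | nil => rfl
  | cons x t =>
    rw [PySem.List.max?_id_cons]
    show (x :: t).foldl stepMax none = some (t.foldl max x)
    rw [List.foldl_cons, show stepMax none x = some x from rfl, foldl_stepMax_some]

theorem maxL_le {l : List Int} {m : Int} (h : maxL l = some m) : ∀ x ∈ l, x ≤ m := by
  intro x hx
  have := PySem.List.max?_isMax (key := fun x => x) (by rw [← maxL_eq_max?, h] : PySem.List.max? l _ = some m)
  exact this x hx

theorem maxL_isSome_of_mem {l : List Int} {x : Int} (h : x ∈ l) : ∃ m, maxL l = some m := by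
  rw [maxL_eq_max?]
  rcases hm : PySem.List.max? l (fun x => x) with _ | m
  · rw [PySem.List.max?_eq_none_iff] at hm
    subst hm; cases h
  · exact ⟨m, rfl⟩

theorem maxL_take_succ (l : List Int) (j : Nat) (h : j < l.length) :
    maxL (l.take (j + 1)) = stepMax (maxL (l.take j)) (l.getD j 0) := by
  have h1 : l.take (j + 1) = l.take j ++ [l[j]] := by
    rw [List.take_add_one, List.getElem?_eq_getElem h]
    rfl
  rw [h1, maxL_append_singleton, List.getD_eq_getElem l 0 h]

theorem maxL_drop (l : List Int) (m : Nat) (h : m < l.length) :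
    maxL (l.drop m) = stepMax (maxL (l.drop (m + 1))) (l.getD m 0) := by
  rw [List.drop_eq_getElem_cons h, maxL_cons, List.getD_eq_getElem l 0 h]

theorem maxL_take_one (l : List Int) (h : 0 < l.length) :
    maxL (l.take 1) = some (l.getD 0 0) := by
  cases l with
  | nil => simp at h
  | cons x t => rfl

-- ===== A reduced to filter-map over the index range =====

-- A's ascending scan: resulting running max and set membership
theorem upLoop (nums : List Int) :
    ∀ (d j : Nat) (S : PySem.Set Int) (c : Int),
      1 ≤ j → j + d + 1 = nums.length →
      maxL (nums.take j) = some c →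
      maxL (nums.take (nums.length - 1)) =
        some (((PySem.List.pyRange (j : Int) ((nums.length : Int) - 1) 1).foldl (loopF nums) (S, c)).2)
      ∧ ∀ k : Nat,
        PySem.Set.contains (((PySem.List.pyRange (j : Int) ((nums.length : Int) - 1) 1).foldl (loopF nums) (S, c)).1) (k : Int)
          = (PySem.Set.contains S (k : Int) ||
             decide (j ≤ k ∧ k < nums.length - 1 ∧ gtOpt (nums.getD k 0) (maxL (nums.take k)) = true)) := by
  intro d
  induction d with
  | zero =>
    intro j S c hj hlen hc
    rw [PySem.List.pyRange_one_eq_nil (by omega)]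
    simp only [List.foldl_nil]
    refine ⟨?_, ?_⟩
    · have hj1 : nums.length - 1 = j := by omega
      rw [hj1]; exact hc
    · intro k
      have hno : ¬ (j ≤ k ∧ k < nums.length - 1 ∧ gtOpt (nums.getD k 0) (maxL (nums.take k)) = true) := by
        rintro ⟨h1, h2, _⟩; omega
      rw [decide_eq_false hno, Bool.or_false]
  | succ d ih =>
    intro j S c hj hlen hc
    have hjn : j < nums.length := by omega
    rw [PySem.List.pyRange_one_cons (by omega : (j:Int) < (nums.length : Int) - 1), List.foldl_cons,
      show (j:Int) + 1 = ((j + 1 : Nat) : Int) by push_cast; ring]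
    have hstep : loopF nums (S, c) (j : Int) =
        (if nums.getD j 0 > c then (PySem.Set.add S (j : Int), nums.getD j 0) else (S, c)) := by
      simp only [loopF, PySem.List.pyGetD_natCast]
    rw [hstep]
    have htake : maxL (nums.take (j + 1)) =
        some (if nums.getD j 0 > c then nums.getD j 0 else c) := by
      rw [maxL_take_succ nums j hjn, hc]
      simp only [stepMax]
      split_ifs <;> rfl
    by_cases hgt : nums.getD j 0 > c
    · rw [if_pos hgt]
      obtain ⟨ih1, ih2⟩ := ih (j + 1) (PySem.Set.add S (j : Int)) (nums.getD j 0)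
        (by omega) (by omega) (by rw [htake, if_pos hgt])
      refine ⟨ih1, ?_⟩
      intro k
      rw [ih2 k, Bool.eq_iff_iff]
      simp only [Bool.or_eq_true, decide_eq_true_eq, PySem.Set.contains_iff, PySem.Set.mem_add,
        Nat.cast_inj]
      have hGj : gtOpt (nums.getD j 0) (maxL (nums.take j)) = true := by
        rw [hc]; simpa [gtOpt] using hgt
      constructor
      · rintro ((h | h) | ⟨h1, h2, h3⟩)
        · exact Or.inl h
        · exact Or.inr ⟨by omega, by omega, by rw [h]; exact hGj⟩
        · exact Or.inr ⟨by omega, h2, h3⟩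
      · rintro (h | ⟨h1, h2, h3⟩)
        · exact Or.inl (Or.inl h)
        · by_cases hkj : k = j
          · exact Or.inl (Or.inr hkj)
          · exact Or.inr ⟨by omega, h2, h3⟩
    · rw [if_neg hgt]
      obtain ⟨ih1, ih2⟩ := ih (j + 1) S c (by omega) (by omega)
        (by rw [htake, if_neg hgt])
      refine ⟨ih1, ?_⟩
      intro k
      rw [ih2 k, Bool.eq_iff_iff]
      simp only [Bool.or_eq_true, decide_eq_true_eq]
      constructor
      · rintro (h | ⟨h1, h2, h3⟩)
        · exact Or.inl h
        · exact Or.inr ⟨by omega, h2, h3⟩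
      · rintro (h | ⟨h1, h2, h3⟩)
        · exact Or.inl h
        · by_cases hkj : k = j
          · subst hkj
            rw [hc] at h3
            simp only [gtOpt, decide_eq_true_eq] at h3
            exact absurd h3 hgt
          · exact Or.inr ⟨by omega, h2, h3⟩

-- A's descending scan: set membership
theorem downLoop (nums : List Int) :
    ∀ (m : Nat) (S : PySem.Set Int) (c : Int),
      maxL (nums.drop (m + 1)) = some c →
      ∀ k : Nat,
        PySem.Set.contains (((PySem.List.pyRange (m : Int) 0 (-1)).foldl (loopF nums) (S, c)).1) (k : Int)
          = (PySem.Set.contains S (k : Int) ||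
             decide (1 ≤ k ∧ k ≤ m ∧ gtOpt (nums.getD k 0) (maxL (nums.drop (k + 1))) = true)) := by
  intro m
  induction m with
  | zero =>
    intro S c _ k
    rw [PySem.List.pyRange_neg_one_eq_nil (by omega)]
    simp only [List.foldl_nil]
    have hno : ¬ (1 ≤ k ∧ k ≤ 0 ∧ gtOpt (nums.getD k 0) (maxL (nums.drop (k + 1))) = true) := by
      rintro ⟨h1, h2, _⟩; omega
    rw [decide_eq_false hno, Bool.or_false]
  | succ m ih =>
    intro S c hc
    have hne : nums.drop (m + 1 + 1) ≠ [] := by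
      intro he
      rw [he] at hc
      simp [maxL] at hc
    have hlt : m + 1 < nums.length := by
      by_contra hno
      exact hne (List.drop_eq_nil_of_le (by omega))
    rw [PySem.List.pyRange_neg_one_cons (by omega : (0:Int) < ((m + 1 : Nat) : Int)), List.foldl_cons,
      show ((m + 1 : Nat) : Int) - 1 = ((m : Nat) : Int) by push_cast; ring]
    have hstep : loopF nums (S, c) ((m + 1 : Nat) : Int) =
        (if nums.getD (m + 1) 0 > c then (PySem.Set.add S ((m + 1 : Nat) : Int), nums.getD (m + 1) 0) else (S, c)) := by
      simp only [loopF, PySem.List.pyGetD_natCast]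
    rw [hstep]
    have hdrop : maxL (nums.drop (m + 1)) =
        some (if nums.getD (m + 1) 0 > c then nums.getD (m + 1) 0 else c) := by
      rw [maxL_drop nums (m + 1) hlt, hc]
      simp only [stepMax]
      split_ifs <;> rfl
    by_cases hgt : nums.getD (m + 1) 0 > c
    · rw [if_pos hgt]
      intro k
      rw [ih (PySem.Set.add S ((m + 1 : Nat) : Int)) (nums.getD (m + 1) 0)
        (by rw [hdrop, if_pos hgt]) k, Bool.eq_iff_iff]
      simp only [Bool.or_eq_true, decide_eq_true_eq, PySem.Set.contains_iff, PySem.Set.mem_add,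
        Nat.cast_inj]
      have hGm : gtOpt (nums.getD (m + 1) 0) (maxL (nums.drop (m + 1 + 1))) = true := by
        rw [hc]; simpa [gtOpt] using hgt
      constructor
      · rintro ((h | h) | ⟨h1, h2, h3⟩)
        · exact Or.inl h
        · exact Or.inr ⟨by omega, by omega, by rw [h]; exact hGm⟩
        · exact Or.inr ⟨h1, by omega, h3⟩
      · rintro (h | ⟨h1, h2, h3⟩)
        · exact Or.inl (Or.inl h)
        · by_cases hkm : k = m + 1
          · exact Or.inl (Or.inr hkm)
          · exact Or.inr ⟨h1, by omega, h3⟩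
    · rw [if_neg hgt]
      intro k
      rw [ih S c (by rw [hdrop, if_neg hgt]) k, Bool.eq_iff_iff]
      simp only [Bool.or_eq_true, decide_eq_true_eq]
      constructor
      · rintro (h | ⟨h1, h2, h3⟩)
        · exact Or.inl h
        · exact Or.inr ⟨h1, by omega, h3⟩
      · rintro (h | ⟨h1, h2, h3⟩)
        · exact Or.inl h
        · by_cases hkm : k = m + 1
          · subst hkm
            rw [hc] at h3
            simp only [gtOpt, decide_eq_true_eq] at h3
            exact absurd h3 hgt
          · exact Or.inr ⟨h1, by omega, h3⟩

-- A reduced to filter-map over the index range (n ≥ 3)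
theorem a_eq (nums : List Int) (h : 3 ≤ nums.length) :
    findValidElements nums =
      ((List.range nums.length).filter
        (fun k => pRec nums k || sRec nums k)).map
        (fun k => nums.getD k 0) := by
  have h2 : ¬ nums.length ≤ 2 := by omega
  unfold findValidElements
  simp only [if_neg h2]
  simp only [show (fun (st : PySem.Set Int × Int) (i : Int) =>
      if PySem.List.pyGetD nums i 0 > st.2 then (PySem.Set.add st.1 i, PySem.List.pyGetD nums i 0) else st)
      = loopF nums from rfl]
  -- the ascending scan, started at j = 1
  obtain ⟨hu1, hu2⟩ := upLoop nums (nums.length - 2) 1 (PySem.Set.ofList [0, (nums.length : Int) - 1])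
    (nums.getD 0 0) (le_refl 1) (by omega) (maxL_take_one nums (by omega))
  simp only [Nat.cast_one] at hu1 hu2
  -- the descending scan, started at m = n - 2
  have hlast : maxL (nums.drop (nums.length - 2 + 1)) = some (nums.getD (nums.length - 1) 0) := by
    rw [show nums.length - 2 + 1 = nums.length - 1 by omega,
      maxL_drop nums (nums.length - 1) (by omega), show nums.length - 1 + 1 = nums.length by omega,
      List.drop_length]
    rfl
  rw [show PySem.List.pyGetD nums 0 0 = nums.getD 0 0 from PySem.List.pyGetD_zero nums 0,
    show PySem.List.pyGetD nums ((nums.length : Int) - 1) 0 = nums.getD (nums.length - 1) 0 from by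
      rw [show ((nums.length : Int) - 1) = ((nums.length - 1 : Nat) : Int) from by omega,
        PySem.List.pyGetD_natCast],
    show ((nums.length : Int) - 2) = ((nums.length - 2 : Nat) : Int) from by omega]
  have hd := downLoop nums (nums.length - 2)
    ((PySem.List.pyRange 1 ((nums.length : Int) - 1) 1).foldl (loopF nums)
      (PySem.Set.ofList [0, (nums.length : Int) - 1], nums.getD 0 0)).1
    (nums.getD (nums.length - 1) 0) hlast
  -- the final comprehension over range(n)
  rw [PySem.List.pyRange_one 0 (nums.length : Int)]
  simp only [sub_zero, Int.toNat_natCast, zero_add]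
  rw [List.filter_map, List.map_map]
  simp only [Function.comp_def, PySem.List.pyGetD_natCast]
  congr 1
  apply List.filter_congr
  intro k hk
  simp only [List.mem_range] at hk
  simp only [hd, hu2, pRec, sRec]
  rw [Bool.eq_iff_iff]
  simp only [Bool.or_eq_true, decide_eq_true_eq, PySem.Set.contains_iff, PySem.Set.mem_ofList,
    List.mem_cons, List.not_mem_nil, or_false]
  have e0 : ((k : Int) = 0) ↔ k = 0 := by omega
  have e1 : ((k : Int) = (nums.length : Int) - 1) ↔ k = nums.length - 1 := by omega
  rw [e0, e1]
  by_cases hk0 : k = 0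
  · subst hk0
    simp [gtOpt, maxL]
  · by_cases hkn : k = nums.length - 1
    · have hdropn : nums.drop (nums.length - 1 + 1) = [] := List.drop_eq_nil_of_le (by omega)
      subst hkn
      simp [hdropn, gtOpt, maxL]
    · have hk1 : 1 ≤ k := by omega
      have hk2 : k < nums.length - 1 := by omega
      have hk3 : k ≤ nums.length - 2 := by omega
      simp [hk0, hkn, hk1, hk2, hk3]

-- ===== B reduced to the same filter-map =====

theorem getD_take (l : List Int) (j i : Nat) (hij : i < j) (hi : i < l.length) :
    (l.take j).getD i 0 = l.getD i 0 := by
  rw [List.getD_eq_getElem _ 0 (by simp [hi, hij] : i < (l.take j).length),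
    List.getElem_take, List.getD_eq_getElem _ 0 hi]

theorem getD_drop (l : List Int) (i k : Nat) (h : i + k < l.length) :
    (l.drop i).getD k 0 = l.getD (i + k) 0 := by
  rw [List.getD_eq_getElem _ 0 (by simp; omega : k < (l.drop i).length),
    List.getElem_drop, List.getD_eq_getElem _ 0 h]

theorem getD_mem {l : List Int} {i : Nat} (h : i < l.length) : l.getD i 0 ∈ l := by
  rw [List.getD_eq_getElem _ 0 h]; exact List.getElem_mem h

-- ===== D&C records: helper facts about segment maxima =====

theorem foldl_max_of_maxL {b : List Int} {m : Int} (h : maxL b = some m) :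
    ∀ c : Int, b.foldl max c = max c m := by
  cases b with
  | nil => simp [maxL] at h
  | cons y t =>
    intro c
    have hm : m = t.foldl max y := by
      have : maxL (y :: t) = some (t.foldl max y) := by
        show (y :: t).foldl stepMax none = _
        rw [List.foldl_cons, show stepMax none y = some y from rfl, foldl_stepMax_some]
      rw [this] at h
      exact (Option.some.inj h).symm
    rw [List.foldl_cons, hm, List.foldl_assoc]

theorem maxL_append (a b : List Int) : maxL (a ++ b) = b.foldl stepMax (maxL a) := by
  simp [maxL, List.foldl_append]

theorem maxL_append_some {a b : List Int} {c m : Int}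
    (ha : maxL a = some c) (hb : maxL b = some m) : maxL (a ++ b) = some (max c m) := by
  rw [maxL_append, ha, foldl_stepMax_some, foldl_max_of_maxL hb]

theorem maxL_eq_none_iff (l : List Int) : maxL l = none ↔ l = [] := by
  rw [maxL_eq_max?]
  exact PySem.List.max?_eq_none_iff _ _

-- nums[lo:hi] as (nums.take hi).drop lo, split at mid
theorem seg_split (nums : List Int) (lo mid hi : Nat) (h1 : lo ≤ mid) (h2 : mid ≤ hi)
    (h3 : hi ≤ nums.length) :
    (nums.take hi).drop lo = (nums.take mid).drop lo ++ (nums.take hi).drop mid := by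
  have hx : nums.take hi = nums.take mid ++ (nums.take hi).drop mid := by
    nth_rewrite 1 [← List.take_append_drop mid (nums.take hi)]
    rw [List.take_take, min_eq_left h2]
  nth_rewrite 1 [hx]
  have hlen : (nums.take mid).length = mid := by simp; omega
  rw [List.drop_append, hlen, show lo - mid = 0 from by omega, List.drop_zero]

theorem seg_nil (nums : List Int) (lo : Nat) : (nums.take lo).drop lo = [] :=
  List.drop_eq_nil_of_le (by simp)

theorem seg_single (nums : List Int) (lo : Nat) (h : lo < nums.length) :
    (nums.take (lo + 1)).drop lo = [nums.getD lo 0] := by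
  have h1 : nums.take (lo + 1) = nums.take lo ++ [nums[lo]] := by
    rw [List.take_add_one, List.getElem?_eq_getElem h]
    rfl
  have hlen : (nums.take lo).length = lo := by simp; omega
  rw [h1, List.drop_append, hlen, Nat.sub_self, List.drop_zero, seg_nil nums lo,
    List.nil_append, List.getD_eq_getElem _ 0 h]

-- D&C prefix records: exactly the segment's prefix-record indices, plus the segment max
theorem prefRecs_spec (nums : List Int) :
    ∀ (fuel lo hi : Nat), hi - lo ≤ fuel → lo < hi → hi ≤ nums.length →
      (prefRecs nums fuel lo hi).1
        = (List.range' lo (hi - lo)).filter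
            (fun k => gtOpt (nums.getD k 0) (maxL ((nums.take k).drop lo)))
      ∧ maxL ((nums.take hi).drop lo) = some (prefRecs nums fuel lo hi).2 := by
  intro fuel
  induction fuel with
  | zero => intro lo hi h1 h2 _; omega
  | succ fuel ih =>
    intro lo hi hf hlt hn
    by_cases hb : hi - lo = 1
    · simp only [prefRecs, if_pos hb]
      constructor
      · rw [hb, List.range'_one, List.filter_cons]
        rw [seg_nil nums lo]
        simp [gtOpt, maxL]
      · rw [show hi = lo + 1 from by omega, seg_single nums lo (by omega)]
        rfl
    · have hm1 : lo < (lo + hi) / 2 := by omega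
      have hm2 : (lo + hi) / 2 < hi := by omega
      set mid := (lo + hi) / 2 with hmid
      obtain ⟨ihl1, ihl2⟩ := ih lo mid (by omega) hm1 (by omega)
      obtain ⟨ihr1, ihr2⟩ := ih mid hi (by omega) hm2 hn
      have hsplit : (nums.take hi).drop lo = (nums.take mid).drop lo ++ (nums.take hi).drop mid :=
        seg_split nums lo mid hi (by omega) (by omega) hn
      simp only [prefRecs, if_neg hb, ← hmid]
      constructor
      · -- split the index range at mid
        have hr : List.range' lo (mid - lo) ++ List.range' (lo + (mid - lo)) (hi - mid)
            = List.range' lo ((mid - lo) + (hi - mid)) := List.range'_append_1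
        rw [show lo + (mid - lo) = mid from by omega] at hr
        rw [show hi - lo = (mid - lo) + (hi - mid) from by omega, ← hr, List.filter_append,
          ← ihl1, ihr1, List.filter_filter]
        congr 1
        -- on the right half the lo-predicate factors through the mid-predicate
        apply (List.filter_congr ?_).symm
        intro k hk
        rw [List.mem_range'_1] at hk
        have hks : (nums.take k).drop lo = (nums.take mid).drop lo ++ (nums.take k).drop mid :=
          seg_split nums lo mid k (by omega) (by omega) (by omega)
        rcases hmk : maxL ((nums.take k).drop mid) with _ | m
        · have hknil : (nums.take k).drop mid = [] := (maxL_eq_none_iff _).mp hmk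
          rw [hks, hknil, List.append_nil, ihl2]
          simp [gtOpt]
        · rw [hks, maxL_append_some ihl2 hmk]
          simp only [gtOpt]
          rw [Bool.eq_iff_iff]
          simp only [Bool.and_eq_true, decide_eq_true_eq, max_lt_iff]
      · rw [hsplit, maxL_append_some ihl2 ihr2]

-- D&C suffix records
theorem sufRecs_spec (nums : List Int) :
    ∀ (fuel lo hi : Nat), hi - lo ≤ fuel → lo < hi → hi ≤ nums.length →
      (sufRecs nums fuel lo hi).1
        = (List.range' lo (hi - lo)).filter
            (fun k => gtOpt (nums.getD k 0) (maxL ((nums.take hi).drop (k + 1))))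
      ∧ maxL ((nums.take hi).drop lo) = some (sufRecs nums fuel lo hi).2 := by
  intro fuel
  induction fuel with
  | zero => intro lo hi h1 h2 _; omega
  | succ fuel ih =>
    intro lo hi hf hlt hn
    by_cases hb : hi - lo = 1
    · simp only [sufRecs, if_pos hb]
      constructor
      · rw [hb, List.range'_one, List.filter_cons]
        rw [show lo + 1 = hi from by omega, seg_nil nums hi]
        simp [gtOpt, maxL]
      · rw [show hi = lo + 1 from by omega, seg_single nums lo (by omega)]
        rfl
    · have hm1 : lo < (lo + hi) / 2 := by omega
      have hm2 : (lo + hi) / 2 < hi := by omega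
      set mid := (lo + hi) / 2 with hmid
      obtain ⟨ihl1, ihl2⟩ := ih lo mid (by omega) hm1 (by omega)
      obtain ⟨ihr1, ihr2⟩ := ih mid hi (by omega) hm2 hn
      have hsplit : (nums.take hi).drop lo = (nums.take mid).drop lo ++ (nums.take hi).drop mid :=
        seg_split nums lo mid hi (by omega) (by omega) hn
      simp only [sufRecs, if_neg hb, ← hmid]
      constructor
      · have hr : List.range' lo (mid - lo) ++ List.range' (lo + (mid - lo)) (hi - mid)
            = List.range' lo ((mid - lo) + (hi - mid)) := List.range'_append_1
        rw [show lo + (mid - lo) = mid from by omega] at hr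
        rw [show hi - lo = (mid - lo) + (hi - mid) from by omega, ← hr, List.filter_append,
          ← ihr1, ihl1, List.filter_filter]
        congr 1
        -- on the left half the hi-predicate factors through the mid-predicate
        apply (List.filter_congr ?_).symm
        intro k hk
        rw [List.mem_range'_1] at hk
        have hks : (nums.take hi).drop (k + 1)
            = (nums.take mid).drop (k + 1) ++ (nums.take hi).drop mid :=
          seg_split nums (k + 1) mid hi (by omega) (by omega) hn
        rcases hmk : maxL ((nums.take mid).drop (k + 1)) with _ | m
        · have hknil : (nums.take mid).drop (k + 1) = [] := (maxL_eq_none_iff _).mp hmk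
          rw [hks, hknil, List.nil_append, ihr2]
          simp [gtOpt]
        · rw [hks, maxL_append_some hmk ihr2]
          simp only [gtOpt]
          rw [Bool.eq_iff_iff]
          simp only [Bool.and_eq_true, decide_eq_true_eq, max_lt_iff]
          tauto
      · rw [hsplit, maxL_append_some ihl2 ihr2]


-- a prefix record never lies right of a suffix record
theorem pRec_le_sRec (nums : List Int) (j k : Nat) (hj : j < nums.length) (hk : k < nums.length)
    (hp : pRec nums j = true) (hs : sRec nums k = true) : j ≤ k := by
  by_contra hlt
  simp only [not_le] at hlt
  -- nums[k] ∈ nums.take j, so the prefix-record property of j gives nums[j] > nums[k]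
  have hkj : nums.getD k 0 ∈ nums.take j := by
    rw [← getD_take nums j k hlt hk]
    exact getD_mem (by simp; omega)
  obtain ⟨m, hm⟩ := maxL_isSome_of_mem hkj
  have h1 : nums.getD j 0 > m := by
    simpa [pRec, hm, gtOpt] using hp
  have h2 : nums.getD k 0 ≤ m := maxL_le hm _ hkj
  -- nums[j] ∈ nums.drop (k+1), so the suffix-record property of k gives nums[k] > nums[j]
  have hjk : nums.getD j 0 ∈ nums.drop (k + 1) := by
    rw [show j = (k + 1) + (j - (k + 1)) by omega, ← getD_drop nums (k + 1) (j - (k + 1)) (by omega)]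
    exact getD_mem (by simp; omega)
  obtain ⟨m', hm'⟩ := maxL_isSome_of_mem hjk
  have h3 : nums.getD k 0 > m' := by
    simpa [sRec, hm', gtOpt] using hs
  have h4 : nums.getD j 0 ≤ m' := maxL_le hm' _ hjk
  omega

theorem alt_eq (nums : List Int) (h : 1 ≤ nums.length) :
    findValidElements_alt nums =
      ((List.range nums.length).filter
        (fun k => pRec nums k || sRec nums k)).map
        (fun k => nums.getD k 0) := by
  have hn0 : nums.length ≠ 0 := by omega
  unfold findValidElements_alt
  simp only [if_neg hn0]
  rw [(prefRecs_spec nums nums.length 0 nums.length (by omega) (by omega) le_rfl).1,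
    (sufRecs_spec nums nums.length 0 nums.length (by omega) (by omega) le_rfl).1]
  simp only [List.drop_zero, List.take_length, Nat.sub_zero, ← List.range_eq_range']
  rw [show (fun k => gtOpt (nums.getD k 0) (maxL (nums.take k))) = pRec nums from rfl,
    show (fun k => gtOpt (nums.getD k 0) (maxL (nums.drop (k + 1)))) = sRec nums from rfl]
  set n := nums.length with hn
  set P := (List.range n).filter (pRec nums) with hP
  set S := (List.range n).filter (sRec nums) with hS
  have hp0 : pRec nums 0 = true := by simp [pRec, gtOpt, maxL]
  have hslast : sRec nums (n - 1) = true := by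
    have hd : nums.drop (n - 1 + 1) = [] := List.drop_eq_nil_of_le (by omega)
    simp [sRec, hd, gtOpt, maxL]
  have hPne : P ≠ [] := List.ne_nil_of_mem
    (List.mem_filter.mpr ⟨List.mem_range.mpr (by omega), hp0⟩)
  have hSne : S ≠ [] := List.ne_nil_of_mem
    (List.mem_filter.mpr ⟨List.mem_range.mpr (by omega), hslast⟩)
  set m2 := S.head hSne with hm2def
  have hm2S : m2 ∈ S := List.head_mem hSne
  have hm2s : sRec nums m2 = true := (List.mem_filter.mp hm2S).2
  have hm2n : m2 < n := List.mem_range.mp (List.mem_filter.mp hm2S).1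
  have hSpw : S.Pairwise (· < ·) := List.Pairwise.filter _ List.pairwise_lt_range
  have hmin : ∀ k ∈ S, m2 ≤ k := by
    intro k hk
    have hcons : S.head hSne :: S.tail = S := List.cons_head_tail hSne
    rw [← hcons] at hSpw hk
    rcases List.mem_cons.mp hk with he | ht
    · omega
    · exact le_of_lt ((List.pairwise_cons.mp hSpw).1 k ht)
  have hsfalse : ∀ k, k < m2 → sRec nums k = false := by
    intro k hk
    by_cases hsk : sRec nums k = true
    · have : k ∈ S := List.mem_filter.mpr ⟨List.mem_range.mpr (by omega), hsk⟩
      have := hmin k this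
      omega
    · simpa using hsk
  have hpfalse : ∀ k, m2 < k → k < n → pRec nums k = false := by
    intro k hk1 hk2
    by_cases hpk : pRec nums k = true
    · have := pRec_le_sRec nums k m2 hk2 hm2n hpk hm2s
      omega
    · simpa using hpk
  -- split range n at m2
  have hsp : List.range' 0 m2 ++ List.range' (0 + m2) (n - m2) = List.range' 0 (m2 + (n - m2)) :=
    List.range'_append_1
  simp only [Nat.zero_add] at hsp
  have hsp2 : List.range' 0 (m2 + (n - m2)) = List.range' 0 n := by congr 1; omega
  have hsplit : List.range n = List.range' 0 m2 ++ List.range' m2 (n - m2) := by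
    rw [List.range_eq_range', ← hsp2]
    exact hsp.symm
  -- the combined filter splits into a pure-p part and a pure-s part
  have hpart1 : (List.range' 0 m2).filter (fun k => pRec nums k || sRec nums k)
      = (List.range' 0 m2).filter (pRec nums) := by
    apply List.filter_congr
    intro k hk
    rw [List.mem_range'_1] at hk
    simp [hsfalse k (by omega)]
  have hpart2 : (List.range' m2 (n - m2)).filter (fun k => pRec nums k || sRec nums k)
      = (List.range' m2 (n - m2)).filter (sRec nums) := by
    apply List.filter_congr
    intro k hk
    rw [List.mem_range'_1] at hk
    by_cases hkm : k = m2
    · subst hkm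
      rw [hm2s]
      simp
    · simp [hpfalse k (by omega) (by omega)]
  have hS2 : S = (List.range' m2 (n - m2)).filter (sRec nums) := by
    rw [hS, hsplit, List.filter_append,
      show (List.range' 0 m2).filter (sRec nums) = [] from
        List.filter_eq_nil_iff.mpr (fun a ha => by
          rw [List.mem_range'_1] at ha
          simp [hsfalse a (by omega)]),
      List.nil_append]
  have hcomb : (List.range n).filter (fun k => pRec nums k || sRec nums k)
      = (List.range' 0 m2).filter (pRec nums) ++ S := by
    rw [hsplit, List.filter_append, hpart1, hpart2, ← hS2]
  -- P splits at m2
  have hTd : n - m2 = (n - m2 - 1) + 1 := by omega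
  have hT : (List.range' m2 (n - m2)).filter (pRec nums)
      = if pRec nums m2 then [m2] else [] := by
    rw [hTd, List.range'_succ, List.filter_cons,
      show (List.range' (m2 + 1) (n - m2 - 1)).filter (pRec nums) = [] from
        List.filter_eq_nil_iff.mpr (fun a ha => by
          rw [List.mem_range'_1] at ha
          simp [hpfalse a (by omega) (by omega)])]
  have hPsplit : P = (List.range' 0 m2).filter (pRec nums) ++ (if pRec nums m2 then [m2] else []) := by
    rw [hP, hsplit, List.filter_append, hT]
  rw [hcomb]
  by_cases hpm2 : pRec nums m2 = true
  · -- the global argmax index is shared: B drops it from the suffix list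
    have hPlast : P.getLastD 0 = m2 := by
      rw [hPsplit, hpm2]
      exact List.getLastD_concat
    have hShead : S.headD 0 = m2 := by
      rw [← List.cons_head_tail hSne, ← hm2def, List.headD_cons]
    rw [hPlast, hShead, if_pos rfl, hPsplit, hpm2]
    rw [← List.cons_head_tail hSne, ← hm2def]
    simp [List.append_assoc]
  · -- disjoint: B keeps both lists whole
    have hPlast : P.getLastD 0 ≠ S.headD 0 := by
      intro he
      have hgl : P.getLastD 0 = P.getLast hPne := by
        rw [List.getLastD_eq_getLast?, List.getLast?_eq_getLast_of_ne_nil hPne]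
        rfl
      have hmem : P.getLast hPne ∈ P := List.getLast_mem hPne
      have hprec : pRec nums (P.getLast hPne) = true := (List.mem_filter.mp hmem).2
      have hShead : S.headD 0 = m2 := by
        rw [← List.cons_head_tail hSne, ← hm2def, List.headD_cons]
      rw [hgl, hShead] at he
      rw [he] at hprec
      exact hpm2 hprec
    rw [if_neg hPlast, hPsplit]
    simp only [if_neg hpm2]
    simp

theorem range_map_getD (l : List Int) : (List.range l.length).map (fun i => l.getD i 0) = l := by
  apply List.ext_getElem
  · simp
  · intro i h1 h2
    simp only [List.length_map, List.length_range] at h1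
    simp [List.getElem?_eq_getElem h1]

theorem filterForm_small (nums : List Int) (h : nums.length ≤ 2) :
    ((List.range nums.length).filter
        (fun k => pRec nums k || sRec nums k)).map (fun k => nums.getD k 0) = nums := by
  have hall : (List.range nums.length).filter (fun k => pRec nums k || sRec nums k)
      = List.range nums.length := by
    apply List.filter_eq_self.mpr
    intro k hk
    simp only [List.mem_range] at hk
    have hk2 : k = 0 ∨ k = 1 := by omega
    rcases hk2 with rfl | rfl
    · simp [pRec, gtOpt, maxL]
    · have hdrop : nums.drop 2 = [] := List.drop_eq_nil_of_le (by omega)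
      simp [sRec, hdrop, gtOpt, maxL]
  rw [hall, range_map_getD]

-- ===== VERDICT (by name: the statement is the Claim_ definition above) =====
theorem findValidElements_spec : Claim_equal_findValidElements := by
  intro nums _
  unfold Spec_findValidElements
  by_cases h0 : nums.length = 0
  · unfold findValidElements findValidElements_alt
    simp [h0]
  · by_cases h : nums.length ≤ 2
    · have ha : findValidElements nums = nums := by
        unfold findValidElements
        simp [h]
      rw [ha, alt_eq nums (by omega), filterForm_small nums h]
    · rw [a_eq nums (by omega), alt_eq nums (by omega)]
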